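-- pv_equiv track=rewrite | github.com/ecri-org/truffleHogger | truffleHogger/truffleHogger.py | get_strings_of_set
-- ===== SOURCE A (Python) =====
-- def get_strings_of_set(word, char_set, threshold):
--     count = 0
--     letters = ""
--     strings = []
--     for char in word:
--         if char in char_set:
--             letters += char
--             count += 1
--         else:
--             if count > threshold:
--                 strings.append(letters)
--             letters = ""
--             count = 0
--     if count > threshold:
--         strings.append(letters)
--     return strings
-- ===== SOURCE B (Python) =====
-- def get_strings_of_set(word, char_set, threshold):
--     # Split word into the segments lying between chars not in char_set
--     # (empty segments included), then keep the ones longer than threshold.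
--     def segments(chars):
--         i = 0
--         while i < len(chars) and chars[i] in char_set:
--             i += 1
--         if i == len(chars):
--             return [chars]
--         return [chars[:i]] + segments(chars[i + 1:])
--     return [s for s in segments(word) if len(s) > threshold]
-- ===== Notes on version B (the rewrite author's own statement) =====
-- stated objective: alternative
-- what changed: Replaced A's single-pass count/letters/strings accumulator loop with a recursive split of the word into segments between non-charset characters (empty segments included), followed by a length-threshold filter.
import Mathlib
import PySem

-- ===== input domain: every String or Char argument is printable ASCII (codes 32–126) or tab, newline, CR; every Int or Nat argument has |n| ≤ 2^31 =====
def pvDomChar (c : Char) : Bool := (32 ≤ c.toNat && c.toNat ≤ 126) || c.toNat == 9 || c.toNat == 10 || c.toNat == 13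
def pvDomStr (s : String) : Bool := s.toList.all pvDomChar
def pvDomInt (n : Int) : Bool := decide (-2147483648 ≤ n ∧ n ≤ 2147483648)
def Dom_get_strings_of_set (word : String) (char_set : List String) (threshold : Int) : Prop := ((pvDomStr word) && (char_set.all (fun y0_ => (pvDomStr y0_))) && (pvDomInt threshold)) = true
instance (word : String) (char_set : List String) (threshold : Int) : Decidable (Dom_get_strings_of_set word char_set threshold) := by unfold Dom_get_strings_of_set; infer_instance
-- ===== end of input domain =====

-- B replaces A's single-pass count/letters accumulator by a recursive split-into-segments
-- (at chars outside char_set) followed by a length filter; same return value, objective: alternative.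

-- ===== PORT A =====
-- state: (count, letters, strings); letters kept as List Char (a Python str), emitted via String.ofList
def get_strings_of_set (word : String) (char_set : List String) (threshold : Int) : List String :=
  let fin := word.toList.foldl
    (fun (st : Int × List Char × List String) char =>
      if String.ofList [char] ∈ char_set then
        (st.1 + 1, st.2.1 ++ [char], st.2.2)
      else
        (0, [], if st.1 > threshold then st.2.2 ++ [String.ofList st.2.1] else st.2.2))
    (0, [], [])
  if fin.1 > threshold then fin.2.2 ++ [String.ofList fin.2.1] else fin.2.2

-- ===== PORT B =====
-- segments chars = pieces of chars between chars not in char_set (empty pieces included)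
def pvSegs (char_set : List String) (chars : List Char) : List (List Char) :=
  let run := chars.takeWhile (fun c => decide (String.ofList [c] ∈ char_set))
  match h : chars.dropWhile (fun c => decide (String.ofList [c] ∈ char_set)) with
  | [] => [chars]
  | _ :: rest => run :: pvSegs char_set rest
termination_by chars.length
decreasing_by
  have h1 : (chars.dropWhile (fun c => decide (String.ofList [c] ∈ char_set))).length ≤ chars.length :=
    List.length_dropWhile_le _ _
  rw [h] at h1; simp at h1; omega

def get_strings_of_set_alt (word : String) (char_set : List String) (threshold : Int) : List String :=
  ((pvSegs char_set word.toList).filter (fun s => (s.length : Int) > threshold)).map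
    (fun s => String.ofList s)

-- ===== PRECONDITION & SPEC =====
def Spec_get_strings_of_set (word : String) (char_set : List String) (threshold : Int) (out : List String) : Prop := out = get_strings_of_set_alt word char_set threshold
instance (word : String) (char_set : List String) (threshold : Int) (out : List String) : Decidable (Spec_get_strings_of_set word char_set threshold out) := by unfold Spec_get_strings_of_set; infer_instance

-- ===== CLAIM (what is proved, stated in full; the proofs are below) =====
def Claim_equal_get_strings_of_set : Prop := ∀ (word : String) (char_set : List String) (threshold : Int), Dom_get_strings_of_set word char_set threshold → Spec_get_strings_of_set word char_set threshold (get_strings_of_set word char_set threshold)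

-- ===== LEMMAS AND PROOFS =====

-- pendSegs: B's segments, generalized with the pending (already scanned) run
def pvPendSegs (char_set : List String) (pend : List Char) (chars : List Char) : List (List Char) :=
  match chars with
  | [] => [pend]
  | c :: rest =>
    if String.ofList [c] ∈ char_set then pvPendSegs char_set (pend ++ [c]) rest
    else pend :: pvPendSegs char_set [] rest

lemma pvPendSegs_eq (char_set : List String) :
    ∀ (chars pend : List Char),
      pvPendSegs char_set pend chars =
        (pend ++ chars.takeWhile (fun c => decide (String.ofList [c] ∈ char_set))) ::
          (match chars.dropWhile (fun c => decide (String.ofList [c] ∈ char_set)) with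
            | [] => []
            | _ :: rest => pvPendSegs char_set [] rest) := by
  intro chars
  induction chars with
  | nil => intro pend; simp [pvPendSegs]
  | cons c rest ih =>
    intro pend
    by_cases hc : String.ofList [c] ∈ char_set
    · simp [pvPendSegs, hc, List.takeWhile_cons, List.dropWhile_cons, ih, List.append_assoc]
    · simp [pvPendSegs, hc, List.takeWhile_cons, List.dropWhile_cons]

lemma pvSegs_eq_pendSegs (char_set : List String) :
    ∀ (chars : List Char), pvSegs char_set chars = pvPendSegs char_set [] chars := by
  intro chars
  induction h : chars.length using Nat.strong_induction_on generalizing chars with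
  | _ n ih =>
    rw [pvSegs, pvPendSegs_eq]
    cases hd : chars.dropWhile (fun c => decide (String.ofList [c] ∈ char_set)) with
    | nil =>
      simp only [hd]
      have htd := List.takeWhile_append_dropWhile
        (p := fun c => decide (String.ofList [c] ∈ char_set)) (l := chars)
      rw [hd, List.append_nil] at htd
      simp [htd]
    | cons d rest =>
      simp only [hd, List.nil_append]
      have h1 : (chars.dropWhile (fun c => decide (String.ofList [c] ∈ char_set))).length ≤ chars.length :=
        List.length_dropWhile_le _ _
      rw [hd] at h1; simp at h1
      rw [ih rest.length (by omega) rest rfl]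

-- the invariant for A's fold: count = letters.length, and the finished result is
-- strings ++ the filtered pending segments
lemma pvFoldA (char_set : List String) (threshold : Int) :
    ∀ (chars pend : List Char) (strings : List String),
      (let fin := chars.foldl
        (fun (st : Int × List Char × List String) char =>
          if String.ofList [char] ∈ char_set then
            (st.1 + 1, st.2.1 ++ [char], st.2.2)
          else
            (0, [], if st.1 > threshold then st.2.2 ++ [String.ofList st.2.1] else st.2.2))
        ((pend.length : Int), pend, strings)
       if fin.1 > threshold then fin.2.2 ++ [String.ofList fin.2.1] else fin.2.2)
      = strings ++ ((pvPendSegs char_set pend chars).filter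
          (fun s => (s.length : Int) > threshold)).map (fun s => String.ofList s) := by
  intro chars
  induction chars with
  | nil =>
    intro pend strings
    simp only [List.foldl_nil, pvPendSegs, List.filter]
    by_cases h : (pend.length : Int) > threshold
    · simp [h]
    · simp [h]
  | cons c rest ih =>
    intro pend strings
    by_cases hc : String.ofList [c] ∈ char_set
    · have hcast : ((pend.length : Int) + 1, pend ++ [c], strings)
          = (((pend ++ [c]).length : Int), pend ++ [c], strings) := by
        simp
      simp only [List.foldl_cons, if_pos hc, pvPendSegs]
      rw [hcast]
      exact ih (pend ++ [c]) strings
    · simp only [List.foldl_cons, if_neg hc, pvPendSegs]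
      have h0 : ((0 : Int), ([] : List Char),
          (if (pend.length : Int) > threshold then strings ++ [String.ofList pend] else strings))
          = ((([] : List Char).length : Int), ([] : List Char),
          (if (pend.length : Int) > threshold then strings ++ [String.ofList pend] else strings)) := by
        simp
      rw [h0, ih [] _]
      by_cases h : (pend.length : Int) > threshold
      · simp [h, List.filter, List.append_assoc]
      · simp [h, List.filter]

-- ===== VERDICT (by name: the statement is the Claim_ definition above) =====
theorem get_strings_of_set_spec : Claim_equal_get_strings_of_set := by
  intro word char_set threshold _
  show get_strings_of_set word char_set threshold = get_strings_of_set_alt word char_set threshold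
  unfold get_strings_of_set get_strings_of_set_alt
  have h := pvFoldA char_set threshold word.toList [] []
  simp only [List.length_nil, Int.natCast_zero] at h
  rw [h, pvSegs_eq_pendSegs, List.nil_append]
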